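-- pv_equiv track=rewrite | github.com/tmo1/adventofcode | 2020/19.py | slice_seq
-- ===== SOURCE A (Python) =====
-- def slice_seq(seq, n, sequences, stack):
-- 	if n == 1:
-- 		stack.append(seq)
-- 		sequences.append(stack.copy())
-- 		stack.pop()
-- 		return sequences
-- 	for i in range(1, (len(seq) - n) + 2):
-- 		stack.append(seq[:i])
-- 		sequences = slice_seq(seq[i:], n - 1, sequences, stack)
-- 		stack.pop()
-- 	return sequences
-- ===== SOURCE B (Python) =====
-- def _combos(items, k):
--     # all k-element sublists of items, in the order itertools.combinations yields them
--     if k == 0: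
--         return [[]]
--     if not items:
--         return []
--     first, rest = items[0], items[1:]
--     return [[first] + c for c in _combos(rest, k - 1)] + _combos(rest, k)
--
--
-- def slice_seq(seq, n, sequences, stack):
--     L = len(seq)
--     for cuts in _combos(list(range(1, L)), n - 1):
--         bounds = [0] + cuts + [L]
--         sequences.append(list(stack) + [seq[a:b] for a, b in zip(bounds, bounds[1:])])
--     return sequences
-- ===== Notes on version B (the rewrite author's own statement) =====
-- stated objective: alternative
-- what changed: B enumerates the n-1 cut positions (combinations of indices 1..len(seq)-1) and builds each partition by slicing between consecutive bounds, instead of A's stack-mutating recursion over prefixes.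
import Mathlib
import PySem

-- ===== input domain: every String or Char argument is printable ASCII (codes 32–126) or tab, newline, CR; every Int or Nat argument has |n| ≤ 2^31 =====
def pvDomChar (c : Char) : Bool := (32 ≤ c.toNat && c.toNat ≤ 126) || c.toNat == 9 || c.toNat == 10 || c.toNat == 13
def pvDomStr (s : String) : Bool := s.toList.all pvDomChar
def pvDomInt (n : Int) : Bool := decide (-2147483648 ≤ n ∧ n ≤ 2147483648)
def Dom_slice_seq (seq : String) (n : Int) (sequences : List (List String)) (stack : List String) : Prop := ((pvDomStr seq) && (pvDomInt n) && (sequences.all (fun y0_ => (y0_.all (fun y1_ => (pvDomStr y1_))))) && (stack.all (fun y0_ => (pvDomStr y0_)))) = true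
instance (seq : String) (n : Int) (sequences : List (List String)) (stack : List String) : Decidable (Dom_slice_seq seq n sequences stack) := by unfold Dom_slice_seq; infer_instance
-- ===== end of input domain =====

-- B enumerates cut positions as combinations instead of A's stack recursion; equivalence of the RETURN value
-- (A also mutates `sequences` in place and returns it; B performs the same appends to `sequences`).

-- ===== PORT A =====
-- A recurses with n decreasing by 1 until n == 1; for n ≤ 0 the Python never terminates
-- (excluded by Pre_), so fuel n.toNat only makes the same recursion total.
def slicePartsA : Nat → String → Int → List (List String) → List String → List (List String)
  | 0, _, _, sequences, _ => sequences
  | f + 1, seq, n, sequences, stack =>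
    if n = 1 then
      sequences ++ [stack ++ [seq]]
    else
      (PySem.List.pyRange 1 ((PySem.Str.len seq - n) + 2) 1).foldl
        (fun seqs i =>
          slicePartsA f (PySem.Str.slice seq (some i) none) (n - 1) seqs
            (stack ++ [PySem.Str.slice seq none (some i)]))
        sequences

def slice_seq (seq : String) (n : Int) (sequences : List (List String)) (stack : List String) : List (List String) :=
  slicePartsA n.toNat seq n sequences stack

-- ===== PORT B =====
-- port of Source B's _combos (all k-element sublists, itertools.combinations order)
def combosB : Int → List Int → List (List Int)
  | k, [] => if k = 0 then [[]] else []
  | k, x :: xs => if k = 0 then [[]] else (combosB (k - 1) xs).map (x :: ·) ++ combosB k xs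

-- the list comprehension [seq[a:b] for a, b in zip(bounds, bounds[1:])]
def partsOf (seq : String) (bounds : List Int) : List String :=
  (bounds.zip bounds.tail).map (fun p => PySem.Str.slice seq (some p.1) (some p.2))

def slice_seq_alt (seq : String) (n : Int) (sequences : List (List String)) (stack : List String) : List (List String) :=
  let L := PySem.Str.len seq
  sequences ++
    (combosB (n - 1) (PySem.List.pyRange 1 L 1)).map
      (fun cuts => stack ++ partsOf seq (0 :: (cuts ++ [L])))

-- ===== PRECONDITION & SPEC =====
-- Pre_ excludes n ≤ 0, where Python A recurses without bound and raises RecursionError.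
def Pre_slice_seq (seq : String) (n : Int) (sequences : List (List String)) (stack : List String) : Prop := 1 ≤ n
instance (seq : String) (n : Int) (sequences : List (List String)) (stack : List String) : Decidable (Pre_slice_seq seq n sequences stack) := by unfold Pre_slice_seq; infer_instance
def pvWitness_slice_seq : String × Int × List (List String) × List String := ("abc", 2, [["x"]], ["p"])

def Spec_slice_seq (seq : String) (n : Int) (sequences : List (List String)) (stack : List String) (out : List (List String)) : Prop := out = slice_seq_alt seq n sequences stack
instance (seq : String) (n : Int) (sequences : List (List String)) (stack : List String) (out : List (List String)) : Decidable (Spec_slice_seq seq n sequences stack out) := by unfold Spec_slice_seq; infer_instance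

-- ===== CLAIM (what is proved, stated in full; the proofs are below) =====
def Claim_equal_slice_seq : Prop := ∀ (seq : String) (n : Int) (sequences : List (List String)) (stack : List String), Dom_slice_seq seq n sequences stack → Pre_slice_seq seq n sequences stack → Spec_slice_seq seq n sequences stack (slice_seq seq n sequences stack)
-- ===== LEMMAS AND PROOFS =====

-- composing Python slices: (s[i:])[a:] = s[i+a:]
lemma slice_from_from (s : String) (i a : Int) (hi : 0 ≤ i) (ha : 0 ≤ a) :
    PySem.Str.slice (PySem.Str.slice s (some i) none) (some a) none
      = PySem.Str.slice s (some (i + a)) none := by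
  apply String.toList_inj.mp
  simp only [PySem.Str.toList_slice, PySem.Chars.slice_eq_listSlice,
    PySem.List.slice_from _ hi, PySem.List.slice_from _ ha,
    PySem.List.slice_from _ (by omega : (0:Int) ≤ i + a), List.drop_drop]
  congr 1
  omega

-- (s[i:])[:a] = s[i:i+a]
lemma slice_from_to (s : String) (i a : Int) (hi : 0 ≤ i) (ha : 0 ≤ a) :
    PySem.Str.slice (PySem.Str.slice s (some i) none) none (some a)
      = PySem.Str.slice s (some i) (some (i + a)) := by
  apply String.toList_inj.mp
  simp only [PySem.Str.toList_slice, PySem.Chars.slice_eq_listSlice,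
    PySem.List.slice_from _ hi, PySem.List.slice_to _ ha,
    PySem.List.slice_toNat _ hi (by omega : (0:Int) ≤ i + a)]
  congr 1
  omega

-- s[i:len(s)] = s[i:]
lemma slice_from_to_len (s : String) (i : Int) (hi : 0 ≤ i) (hle : i ≤ PySem.Str.len s) :
    PySem.Str.slice s (some i) (some (PySem.Str.len s)) = PySem.Str.slice s (some i) none := by
  apply String.toList_inj.mp
  simp only [PySem.Str.toList_slice, PySem.Chars.slice_eq_listSlice,
    PySem.List.slice_from _ hi]
  rw [PySem.List.slice_toNat _ hi (by rw [PySem.Str.len_eq] at hle ⊢; omega)]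
  apply List.take_of_length_le
  simp only [List.length_drop]
  have := PySem.Str.len_eq s
  omega

-- s[:] = s
lemma slice_from_zero (s : String) : PySem.Str.slice s (some 0) none = s := by
  apply String.toList_inj.mp
  simp [PySem.Str.toList_slice, PySem.List.slice_from _ (le_refl (0:Int))]

lemma len_slice_from (s : String) (i : Int) (hi : 0 ≤ i) (hle : i ≤ PySem.Str.len s) :
    PySem.Str.len (PySem.Str.slice s (some i) none) = PySem.Str.len s - i := by
  have h := PySem.Str.len_eq s
  simp only [PySem.Str.len_eq, PySem.Str.toList_slice, PySem.Chars.slice_eq_listSlice,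
    PySem.List.slice_from _ hi, List.length_drop]
  omega

lemma partsOf_cons (seq : String) (a b : Int) (rest : List Int) :
    partsOf seq (a :: b :: rest)
      = PySem.Str.slice seq (some a) (some b) :: partsOf seq (b :: rest) := by
  simp [partsOf]

lemma partsOf_pair (seq : String) (a b : Int) :
    partsOf seq [a, b] = [PySem.Str.slice seq (some a) (some b)] := by
  simp [partsOf]

lemma combosB_zero (l : List Int) : combosB 0 l = [[]] := by
  cases l <;> simp [combosB]

lemma combosB_nil_of_short (k : Int) (l : List Int) (hk : 0 < k) (h : (l.length : Int) < k) :
    combosB k l = [] := by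
  induction l generalizing k with
  | nil => rw [combosB, if_neg (by omega : ¬ k = 0)]
  | cons x xs ih =>
    simp only [List.length_cons] at h
    push_cast at h
    rw [combosB, if_neg (by omega)]
    rw [ih (k - 1) (by omega) (by omega), ih k hk (by omega)]
    simp

-- lexicographic split of the k+1-combinations of a range by their first element
lemma combosB_split (k : Int) (hk : 0 ≤ k) :
    ∀ (m : Nat) (a L : Int), (L - a).toNat ≤ m →
      combosB (k + 1) (PySem.List.pyRange a L 1)
        = (PySem.List.pyRange a (L - k) 1).flatMap
            (fun i => (combosB k (PySem.List.pyRange (i + 1) L 1)).map (i :: ·)) := by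
  intro m
  induction m with
  | zero =>
    intro a L hm
    rw [PySem.List.pyRange_one_eq_nil (by omega : L ≤ a),
      PySem.List.pyRange_one_eq_nil (by omega : L - k ≤ a)]
    rw [combosB, if_neg (by omega : ¬ k + 1 = 0)]
    simp
  | succ m ih =>
    intro a L hm
    by_cases ha : a < L - k
    · rw [PySem.List.pyRange_one_cons (by omega : a < L),
        PySem.List.pyRange_one_cons ha, List.flatMap_cons]
      rw [combosB, if_neg (by omega)]
      rw [ih (a + 1) L (by omega)]
      simp
    · rw [combosB_nil_of_short (k + 1) _ (by omega)
        (by rw [PySem.List.length_pyRange_one]; omega),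
        PySem.List.pyRange_one_eq_nil (by omega : L - k ≤ a)]
      simp

-- the main invariant: A's recursion on s[off:] emits exactly B's combinations of cuts
lemma slicePartsA_eq (f : Nat) :
    ∀ (n : Int) (seqs : List (List String)) (stack : List String) (off : Int) (s : String),
      1 ≤ n → n.toNat ≤ f → 0 ≤ off → off ≤ PySem.Str.len s →
      slicePartsA f (PySem.Str.slice s (some off) none) n seqs stack
        = seqs ++
            (combosB (n - 1) (PySem.List.pyRange (off + 1) (PySem.Str.len s) 1)).map
              (fun cuts => stack ++ partsOf s (off :: (cuts ++ [PySem.Str.len s]))) := by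
  induction f with
  | zero => intro n _ _ _ _ hn hf _ _; omega
  | succ f ih =>
    intro n seqs stack off s hn hf hoff hoffle
    by_cases h1 : n = 1
    · subst h1
      simp only [slicePartsA, if_true]
      rw [show (1:Int) - 1 = 0 by norm_num, combosB_zero]
      simp only [List.map_cons, List.map_nil, List.nil_append, partsOf_pair]
      rw [slice_from_to_len s off hoff hoffle]
    · have h2 : 2 ≤ n := by omega
      simp only [slicePartsA]
      rw [if_neg h1]
      rw [len_slice_from s off hoff hoffle]
      -- rewrite every loop iteration via the induction hypothesis
      rw [PySem.List.foldl_congr_mem _ _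
        (fun seqs i => seqs ++
          (combosB (n - 2) (PySem.List.pyRange (off + i + 1) (PySem.Str.len s) 1)).map
            (fun cuts => stack ++ partsOf s (off :: ((off + i) :: cuts ++ [PySem.Str.len s]))))
        seqs ?_]
      · rw [PySem.List.foldl_append_eq_flatMap]
        -- now reindex and compare with B's combinations split by first cut
        have hsplit := combosB_split (n - 2) (by omega) (PySem.Str.len s - off).toNat
          (off + 1) (PySem.Str.len s) (by omega)
        rw [show n - 1 = (n - 2) + 1 by ring, hsplit, List.map_flatMap]
        congr 1
        rw [PySem.List.pyRange_one 1 (PySem.Str.len s - off - n + 2),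
          PySem.List.pyRange_one (off + 1) (PySem.Str.len s - (n - 2))]
        rw [show PySem.Str.len s - (n - 2) - (off + 1) = PySem.Str.len s - off - n + 2 - 1 by
          ring]
        rw [List.flatMap_map, List.flatMap_map]
        apply List.flatMap_congr
        intro k _
        have hk : off + (1 + (k : Int)) = off + 1 + (k : Int) := by ring
        simp only [List.map_map, hk]
        apply List.map_congr_left
        intro cuts _
        simp
      · intro acc i hi
        rw [PySem.List.mem_pyRange_one] at hi
        rw [slice_from_from s off i hoff (by omega),
          slice_from_to s off i hoff (by omega)]
        rw [ih (n - 1) acc (stack ++ [PySem.Str.slice s (some off) (some (off + i))])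
          (off + i) s (by omega) (by omega) (by omega) (by omega)]
        simp only [show n - 1 - 1 = n - 2 by ring]
        congr 1
        apply List.map_congr_left
        intro cuts _
        simp only [List.cons_append]
        rw [partsOf_cons]
        simp

-- ===== VERDICT (by name: the statement is the Claim_ definition above) =====
theorem slice_seq_spec : Claim_equal_slice_seq := by
  intro seq n seqs stack _ hpre
  unfold Spec_slice_seq slice_seq slice_seq_alt
  have h := slicePartsA_eq n.toNat n seqs stack 0 seq hpre (le_refl _) (le_refl 0)
    (by rw [PySem.Str.len_eq]; positivity)
  rw [slice_from_zero] at h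
  simpa using h
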